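-- pv_equiv track=rewrite | github.com/K-WeiMing/advent_of_code | 3/day_three.py | part_two
-- ===== SOURCE A (Python) =====
-- def part_two(data):
--     # Time complexity: O(n)
--     # Space complexity: O(1)
--
--     tmp = []
--     priorities = 0
--
--     counter = -1
--     for items in data:
--         tmp.append(items)
--         counter += 1
--
--         if counter == 2:
--             # Process the result
--             common_items = set(tmp[0]) & set(tmp[1]) & set(tmp[2])
--             priorities += get_common(common_items)
--
--             # Reset values
--             tmp = []
--             counter = -1
--
--     return priorities
--
-- def get_common(com_item: set) -> int:
--     """Goes through the list and returns the cumulative priorities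
--
--     Args:
--         com_item (List[str]): List of items in elves bag
--
--     Returns:
--         int: cumulative priorities of all common items
--     """
--     res = 0
--     for common in com_item:
--         if common.islower():
--             res += ord(common) - ord("a") + 1
--         else:
--             # Include 27 to push the first alphabet ('A') to 27
--             res += ord(common) - ord("A") + 27
--     return res
-- ===== SOURCE B (Python) =====
-- def part_two(data):
--     # Character-major: instead of intersecting sets per group, scan each
--     # candidate character over all complete groups and count the groups
--     # where it appears on all three lines.
--     n = len(data) - len(data) % 3
--     groups = [(data[i], data[i + 1], data[i + 2]) for i in range(0, n, 3)]
--     universe = set()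
--     for a, _, _ in groups:
--         universe.update(a)
--     total = 0
--     for ch in universe:
--         p = ord(ch) - 96 if ch.islower() else ord(ch) - 38
--         total += p * sum(1 for a, b, c in groups if ch in a and ch in b and ch in c)
--     return total
-- ===== Notes on version B (the rewrite author's own statement) =====
-- stated objective: alternative
-- what changed: Transposed the computation from group-major to character-major: instead of A's tmp/counter state machine intersecting three sets per group, B lists the complete groups once, collects the candidate characters from the groups' first lines into one set, and for each candidate character counts the complete groups containing it on all three lines, summing priority times count.
import Mathlib
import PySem

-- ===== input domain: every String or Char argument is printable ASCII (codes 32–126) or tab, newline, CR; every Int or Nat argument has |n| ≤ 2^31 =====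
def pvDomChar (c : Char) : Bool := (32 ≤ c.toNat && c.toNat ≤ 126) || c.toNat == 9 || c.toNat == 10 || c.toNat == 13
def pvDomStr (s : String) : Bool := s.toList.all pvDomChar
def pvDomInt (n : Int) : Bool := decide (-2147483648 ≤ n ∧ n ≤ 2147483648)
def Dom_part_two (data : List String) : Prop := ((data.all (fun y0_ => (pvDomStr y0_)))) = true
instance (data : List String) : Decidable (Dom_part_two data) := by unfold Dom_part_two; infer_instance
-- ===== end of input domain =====

-- ===== PORT A =====
-- B transposes the computation: character-major counting over the complete groups instead of A's
-- tmp/counter state machine with a per-group set intersection (alternative; same cost).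

-- A's helper get_common: priority sum over the common-items set (iterates a set; the sum is order-independent)
def get_common (com_item : PySem.Set Char) : Int :=
  com_item.foldl (fun res common =>
    if PySem.Chars.islower common then res + ((common.toNat : Int) - 97 + 1)
    else res + ((common.toNat : Int) - 65 + 27)) 0

-- A's loop body, verbatim (so the port is data.foldl pvStepA ([], -1, 0))
def pvStepA (st : List String × Int × Int) (items : String) : List String × Int × Int :=
  let tmp := st.1 ++ [items]
  let counter := st.2.1 + 1
  if counter == 2 then
    -- tmp has exactly three elements here; tmp[0]/tmp[1]/tmp[2] via pyGetD
    let common_items :=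
      PySem.Set.inter
        (PySem.Set.inter (PySem.Set.ofList (PySem.List.pyGetD tmp 0 "").toList)
          (PySem.Set.ofList (PySem.List.pyGetD tmp 1 "").toList))
        (PySem.Set.ofList (PySem.List.pyGetD tmp 2 "").toList)
    (([] : List String), (-1 : Int), st.2.2 + get_common common_items)
  else (tmp, counter, st.2.2)

def part_two (data : List String) : Int :=
  (data.foldl pvStepA (([] : List String), (-1 : Int), (0 : Int))).2.2

-- ===== PORT B =====
-- character-major: list the complete groups, collect the candidate characters (union of the
-- groups' first lines), then for each candidate count the groups containing it on all three lines
def part_two_alt (data : List String) : Int :=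
  let n : Int := (data.length : Int) - PySem.Int.mod (data.length : Int) 3
  let groups : List (String × String × String) :=
    (PySem.List.pyRange 0 n 3).map (fun i =>
      (PySem.List.pyGetD data i "", PySem.List.pyGetD data (i + 1) "", PySem.List.pyGetD data (i + 2) ""))
  let univ : PySem.Set Char :=
    groups.foldl (fun s g => PySem.Set.update s g.1.toList) PySem.Set.empty
  univ.foldl (fun total ch =>
    let p : Int := if PySem.Chars.islower ch then (ch.toNat : Int) - 96 else (ch.toNat : Int) - 38
    total + p * ((groups.map (fun g =>
      if g.1.toList.contains ch && g.2.1.toList.contains ch && g.2.2.toList.contains ch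
      then (1 : Int) else 0)).sum)) 0

-- ===== PRECONDITION & SPEC =====
def Spec_part_two (data : List String) (out : Int) : Prop := out = part_two_alt data
instance (data : List String) (out : Int) : Decidable (Spec_part_two data out) := by unfold Spec_part_two; infer_instance

-- ===== CLAIM =====
def Claim_equal_part_two : Prop := ∀ (data : List String), Dom_part_two data → Spec_part_two data (part_two data)

-- ===== LEMMAS AND PROOFS =====

-- the complete groups of three, structurally
def pvTriples : List String → List (String × String × String)
  | a :: b :: c :: r => (a, b, c) :: pvTriples r
  | _ => []

def pvInter3 (g : String × String × String) : PySem.Set Char :=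
  PySem.Set.inter
    (PySem.Set.inter (PySem.Set.ofList g.1.toList) (PySem.Set.ofList g.2.1.toList))
    (PySem.Set.ofList g.2.2.toList)

def pvPrio (ch : Char) : Int :=
  if PySem.Chars.islower ch then (ch.toNat : Int) - 96 else (ch.toNat : Int) - 38

def pvInd (g : String × String × String) (ch : Char) : Bool :=
  g.1.toList.contains ch && g.2.1.toList.contains ch && g.2.2.toList.contains ch

-- three steps of A's loop from the reset state consume one triple
theorem pvStepA_run3 (a b c : String) (acc : Int) :
    pvStepA (pvStepA (pvStepA (([] : List String), (-1 : Int), acc) a) b) c =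
      (([] : List String), (-1 : Int), acc + get_common (pvInter3 (a, b, c))) := by
  simp [pvStepA, pvInter3, PySem.List.pyGetD, PySem.List.pyGet?, PySem.List.pyIdx?]

-- A's state machine sums get_common over the complete triples
theorem loopA : ∀ (n : Nat) (data : List String), data.length ≤ n → ∀ (acc : Int),
    (data.foldl pvStepA (([] : List String), (-1 : Int), acc)).2.2 =
      acc + ((pvTriples data).map (fun g => get_common (pvInter3 g))).sum := by
  intro n
  induction n with
  | zero =>
    intro data hlen acc
    interval_cases h : data.length
    · simp at h; subst h; simp [pvTriples]
  | succ m ih =>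
    intro data hlen acc
    match data with
    | [] => simp [pvTriples]
    | [a] => simp [pvTriples, pvStepA]
    | [a, b] => simp [pvTriples, pvStepA]
    | a :: b :: c :: rest =>
      have h3 : rest.length ≤ m := by simp at hlen; omega
      simp only [List.foldl_cons, pvStepA_run3, ih rest h3]
      simp [pvTriples]
      ring

-- A's get_common is the priority sum over the set's element list
theorem get_common_eq (s : PySem.Set Char) : get_common s = (s.map pvPrio).sum := by
  suffices h : ∀ (l : List Char) (r : Int),
      l.foldl (fun res common =>
        if PySem.Chars.islower common then res + ((common.toNat : Int) - 97 + 1)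
        else res + ((common.toNat : Int) - 65 + 27)) r = r + (l.map pvPrio).sum by
    simpa [get_common] using h s 0
  intro l
  induction l with
  | nil => intro r; simp
  | cons c t ih =>
    intro r
    simp only [List.foldl_cons, List.map_cons, List.sum_cons, ih, pvPrio]
    split_ifs <;> ring

-- membership in a triple's intersection set is the three-way containment test
theorem mem_inter3 (g : String × String × String) (ch : Char) :
    ch ∈ pvInter3 g ↔ pvInd g ch = true := by
  simp [pvInter3, pvInd, PySem.Set.mem_inter, PySem.Set.mem_ofList,
    and_assoc]

theorem nodup_inter3 (g : String × String × String) : (pvInter3 g).Nodup :=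
  PySem.Set.nodup_inter _ _ (PySem.Set.nodup_inter _ _ (PySem.Set.nodup_ofList _))

-- pyRange 0 (L - L%3) 3 lists the start indices of the complete groups
theorem pyRange_groups (L : Nat) :
    PySem.List.pyRange 0 ((L : Int) - PySem.Int.mod (L : Int) 3) 3 =
      (List.range (L / 3)).map (fun j => ((3 * j : Nat) : Int)) := by
  have hn : (L : Int) - PySem.Int.mod (L : Int) 3 = ((3 * (L / 3) : Nat) : Int) := by
    rw [show ((3 : Int)) = ((3 : Nat) : Int) by norm_num, PySem.Int.mod_natCast]
    push_cast
    omega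
  rw [hn, PySem.List.pyRange_of_pos 0 _ (by norm_num : (0 : Int) < 3)]
  have hidx : (if (0 : Int) < ((3 * (L / 3) : Nat) : Int)
      then ((((3 * (L / 3) : Nat) : Int) - 0 + 3 - 1) / 3).toNat else 0) = L / 3 := by
    split_ifs with h
    · omega
    · omega
  rw [hidx]
  exact List.map_congr_left fun j hj => by push_cast; ring

-- the start indices, dereferenced, are exactly the complete triples
theorem range_triples_fuel : ∀ (n : Nat) (data : List String), data.length ≤ n →
    (List.range (data.length / 3)).map (fun j =>
      (data.getD (3 * j) "", data.getD (3 * j + 1) "", data.getD (3 * j + 2) "")) =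
      pvTriples data := by
  intro n
  induction n with
  | zero =>
    intro data hlen
    interval_cases h : data.length
    · simp at h; subst h; simp [pvTriples]
  | succ m ih =>
    intro data hlen
    match data with
    | [] => simp [pvTriples]
    | [a] => simp [pvTriples]
    | [a, b] => simp [pvTriples]
    | a :: b :: c :: r =>
      have h3 : r.length ≤ m := by simp at hlen; omega
      have hlen3 : (a :: b :: c :: r).length / 3 = r.length / 3 + 1 := by simp; omega
      rw [hlen3, List.range_succ_eq_map, List.map_cons, List.map_map, pvTriples]
      congr 1
      rw [← ih r h3]
      refine List.map_congr_left fun j hj => ?_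
      have h0 : 3 * Nat.succ j = 3 * j + 2 + 1 := by omega
      simp [Function.comp, h0]

theorem range_triples (data : List String) :
    (List.range (data.length / 3)).map (fun j =>
      (data.getD (3 * j) "", data.getD (3 * j + 1) "", data.getD (3 * j + 2) "")) =
      pvTriples data := range_triples_fuel data.length data le_rfl

-- B's groups comprehension builds exactly the complete triples
theorem groups_eq (data : List String) :
    (PySem.List.pyRange 0 ((data.length : Int) - PySem.Int.mod (data.length : Int) 3) 3).map
      (fun i => (PySem.List.pyGetD data i "", PySem.List.pyGetD data (i + 1) "",
                 PySem.List.pyGetD data (i + 2) "")) = pvTriples data := by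
  rw [pyRange_groups, List.map_map, ← range_triples data]
  refine List.map_congr_left fun j hj => ?_
  have h1 : ((3 * j : Nat) : Int) + 1 = ((3 * j + 1 : Nat) : Int) := by push_cast; ring
  have h2 : ((3 * j : Nat) : Int) + 2 = ((3 * j + 2 : Nat) : Int) := by push_cast; ring
  simp only [Function.comp, h1, h2, PySem.List.pyGetD_natCast]

-- membership in the accumulated universe
theorem mem_foldl_update (G : List (String × String × String)) :
    ∀ (s : PySem.Set Char) (ch : Char),
      ch ∈ G.foldl (fun s g => PySem.Set.update s g.1.toList) s ↔
        ch ∈ s ∨ ∃ g ∈ G, ch ∈ g.1.toList := by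
  induction G with
  | nil => intro s ch; simp
  | cons g R ih =>
    intro s ch
    simp only [List.foldl_cons, ih, PySem.Set.mem_update, List.mem_cons]
    constructor
    · rintro ((h | h) | ⟨g', hg', h⟩)
      · exact Or.inl h
      · exact Or.inr ⟨g, Or.inl rfl, h⟩
      · exact Or.inr ⟨g', Or.inr hg', h⟩
    · rintro (h | ⟨g', (rfl | hg'), h⟩)
      · exact Or.inl (Or.inl h)
      · exact Or.inl (Or.inr h)
      · exact Or.inr ⟨g', hg', h⟩

theorem nodup_foldl_update (G : List (String × String × String)) :
    ∀ (s : PySem.Set Char), s.Nodup →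
      (G.foldl (fun s g => PySem.Set.update s g.1.toList) s).Nodup := by
  induction G with
  | nil => intro s hs; simpa
  | cons g R ih => intro s hs; exact ih _ (PySem.Set.nodup_update _ _ hs)

-- the sum-exchange: character-major counting over U equals group-major intersection sums
theorem exchange : ∀ (G : List (String × String × String)) (U : List Char), U.Nodup →
    (∀ g ∈ G, ∀ ch : Char, pvInd g ch = true → ch ∈ U) →
    (U.map (fun ch => pvPrio ch *
        ((G.map (fun g => if pvInd g ch then (1 : Int) else 0)).sum))).sum =
      (G.map (fun g => get_common (pvInter3 g))).sum := by
  intro G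
  induction G with
  | nil => intro U _ _; simp
  | cons g R ih =>
    intro U hU hsub
    have hR := ih U hU (fun g' hg' => hsub g' (List.mem_cons_of_mem _ hg'))
    simp only [List.map_cons, List.sum_cons]
    have hsplit : (U.map (fun ch => pvPrio ch *
        ((if pvInd g ch then (1 : Int) else 0) +
          (R.map (fun g' => if pvInd g' ch then (1 : Int) else 0)).sum))).sum =
        (U.map (fun ch => if pvInd g ch then pvPrio ch else 0)).sum +
        (U.map (fun ch => pvPrio ch *
          ((R.map (fun g' => if pvInd g' ch then (1 : Int) else 0)).sum))).sum := by
      rw [← PySem.List.sum_map_add_int]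
      refine congrArg _ (List.map_congr_left fun ch _ => ?_)
      simp only [mul_add, mul_ite, mul_one, mul_zero]
    rw [hsplit, hR]
    congr 1
    -- the head term is get_common of the intersection set
    rw [← List.sum_toFinset _ hU, ← Finset.sum_filter (fun ch => pvInd g ch = true) pvPrio]
    have hset : U.toFinset.filter (fun ch => pvInd g ch = true) = (pvInter3 g).toFinset := by
      ext ch
      simp only [Finset.mem_filter, List.mem_toFinset, mem_inter3]
      constructor
      · rintro ⟨-, h⟩; exact h
      · intro h; exact ⟨hsub g (List.mem_cons_self) ch h, h⟩
    rw [hset, List.sum_toFinset _ (nodup_inter3 g), get_common_eq]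

-- B's port, characterised via the triples
theorem altB (data : List String) :
    part_two_alt data =
      (((pvTriples data).foldl (fun s g => PySem.Set.update s g.1.toList) PySem.Set.empty).map
        (fun ch => pvPrio ch *
          (((pvTriples data).map (fun g => if pvInd g ch then (1 : Int) else 0)).sum))).sum := by
  show (((PySem.List.pyRange 0 ((data.length : Int) - PySem.Int.mod (data.length : Int) 3) 3).map
      (fun i => (PySem.List.pyGetD data i "", PySem.List.pyGetD data (i + 1) "",
                 PySem.List.pyGetD data (i + 2) ""))).foldl (fun s g => PySem.Set.update s g.1.toList)
        PySem.Set.empty).foldl (fun total ch =>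
          total + (if PySem.Chars.islower ch then (ch.toNat : Int) - 96 else (ch.toNat : Int) - 38) *
            ((((PySem.List.pyRange 0 ((data.length : Int) - PySem.Int.mod (data.length : Int) 3) 3).map
              (fun i => (PySem.List.pyGetD data i "", PySem.List.pyGetD data (i + 1) "",
                         PySem.List.pyGetD data (i + 2) ""))).map (fun g =>
              if g.1.toList.contains ch && g.2.1.toList.contains ch && g.2.2.toList.contains ch
              then (1 : Int) else 0)).sum)) 0 = _
  rw [groups_eq]
  rw [PySem.List.foldl_add _ (fun ch =>
    (if PySem.Chars.islower ch then (ch.toNat : Int) - 96 else (ch.toNat : Int) - 38) *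
      (((pvTriples data).map (fun g =>
        if g.1.toList.contains ch && g.2.1.toList.contains ch && g.2.2.toList.contains ch
        then (1 : Int) else 0)).sum)) 0]
  simp only [pvPrio, pvInd, zero_add]
  rfl

-- ===== VERDICT =====
theorem part_two_spec : Claim_equal_part_two := by
  intro data _
  unfold Spec_part_two
  show part_two data = part_two_alt data
  rw [part_two, loopA data.length data le_rfl 0, zero_add, altB]
  exact (exchange (pvTriples data)
    ((pvTriples data).foldl (fun s g => PySem.Set.update s g.1.toList) PySem.Set.empty)
    (nodup_foldl_update _ _ List.nodup_nil)
    (fun g hg ch hch => (mem_foldl_update _ _ _).mpr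
      (Or.inr ⟨g, hg, by
        have := (mem_inter3 g ch).mpr hch
        simp [pvInter3, PySem.Set.mem_inter, PySem.Set.mem_ofList] at this
        exact this.1.1⟩))).symm
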